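-- pv_equiv track=rewrite | github.com/Naddiseo/ling401-pywals | dryer.py | dryer_analise
-- ===== SOURCE A (Python) =====
-- def dryer_analise(data):
-- 	# ret[area][feature_value] = genus_count
-- 	ret = {}
--
-- 	for area, genus_map in data.items():
-- 		ret.setdefault(area, {})
--
-- 		for feature_map in genus_map.values():
-- 			top_count = -1
-- 			current_feature = None
-- 			for feature_value, language_count in feature_map.items():
-- 				ret[area].setdefault(feature_value, 0)
--
-- 				if language_count > top_count:
-- 					current_feature = feature_value
-- 					top_count = language_count
--
-- 			ret[area][current_feature] += 1
--
-- 	return ret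
-- ===== SOURCE B (Python) =====
-- def dryer_analise(data):
-- 	# ret[area][feature_value] = genus_count.  Per area: stage the genus maps,
-- 	# pick each genus's dominant feature value as the head of a stable
-- 	# descending sort of its items (stability keeps the first-seen value on
-- 	# ties, like the original scan), then tally the winners into a dict of
-- 	# all feature values initialised to zero.
-- 	ret = {}
-- 	for area, genus_map in data.items():
-- 		maps = list(genus_map.values())
-- 		winners = [sorted(fm.items(), key=lambda kv: kv[1], reverse=True)[0][0]
-- 		           for fm in maps]
-- 		counts = {fv: 0 for fm in maps for fv in fm}
-- 		for w in winners:
-- 			counts[w] += 1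
-- 		ret[area] = counts
-- 	return ret
-- ===== Notes on version B (the rewrite author's own statement) =====
-- stated objective: alternative
-- what changed: A finds each genus's dominant feature with a running strict-> argmax scan interleaved with setdefault zero-initialisation inside one triple-nested loop mutating ret[area] in place; B instead selects each winner as the head of a stable descending sort of the genus's items (stability reproduces the first-seen tie-break), collects all winners per area in one comprehension, zero-initialises a fresh counts dict in a separate comprehension, tallies the winners, and assigns the finished dict once.
-- outside the precondition, e.g. on dryer_analise({'x': {'g': {'a': -1}}}): A raises KeyError, B returns {'x': {'a': 1}}
import Mathlib
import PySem

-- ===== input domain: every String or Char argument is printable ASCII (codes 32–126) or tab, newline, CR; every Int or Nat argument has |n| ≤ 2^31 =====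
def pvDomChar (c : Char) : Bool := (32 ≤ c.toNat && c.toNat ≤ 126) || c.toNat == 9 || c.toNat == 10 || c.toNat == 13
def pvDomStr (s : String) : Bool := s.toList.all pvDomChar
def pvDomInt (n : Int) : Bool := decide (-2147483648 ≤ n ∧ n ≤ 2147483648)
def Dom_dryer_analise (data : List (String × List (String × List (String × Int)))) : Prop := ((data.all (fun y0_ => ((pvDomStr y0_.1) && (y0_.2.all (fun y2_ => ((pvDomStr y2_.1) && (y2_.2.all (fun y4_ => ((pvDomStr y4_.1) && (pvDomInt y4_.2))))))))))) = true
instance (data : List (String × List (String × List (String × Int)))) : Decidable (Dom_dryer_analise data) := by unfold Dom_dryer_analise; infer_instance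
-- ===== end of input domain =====

-- B picks each genus's dominant value as the head of a stable descending sort and tallies the
-- staged winners into a zero-initialised dict, instead of A's interleaved running-argmax triple loop.

-- ===== PORT A =====
-- the 'for feature_value, language_count in feature_map.items()' loop (mutates ret[area], tracks top_count/current_feature)
def pyA_featureLoop (area : String) (feature_map : List (String × Int))
    (st0 : PySem.Dict String (PySem.Dict String Int) × (Int × Option String)) :
    PySem.Dict String (PySem.Dict String Int) × (Int × Option String) :=
  feature_map.foldl (fun st fv =>
    (st.1.modify area PySem.Dict.empty (fun d => d.setdefault fv.1 0),  -- ret[area].setdefault(fv, 0); ret[area] always present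
     if fv.2 > st.2.1 then (fv.2, some fv.1) else st.2)) st0

-- the 'for feature_map in genus_map.values()' loop
def pyA_genusLoop (area : String) (genus_map : List (String × List (String × Int)))
    (ret : PySem.Dict String (PySem.Dict String Int)) : PySem.Dict String (PySem.Dict String Int) :=
  genus_map.foldl (fun ret gfm =>
    let st := pyA_featureLoop area gfm.2 (ret, ((-1 : Int), (none : Option String)))
    match st.2.2 with
    | some cf => st.1.modify area PySem.Dict.empty (fun d => d.modify cf 0 (· + 1))  -- ret[area][current_feature] += 1
    | none => st.1) ret  -- Python raises KeyError here (current_feature is None); excluded by Pre_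

def dryer_analise (data : List (String × List (String × List (String × Int)))) : List (String × List (String × Int)) :=
  ((data.foldl (fun ret ag =>
      pyA_genusLoop ag.1 ag.2 (ret.setdefault ag.1 PySem.Dict.empty)) PySem.Dict.empty).items).map
    (fun p => (p.1, p.2.items))

-- ===== PORT B =====
-- sorted(fm.items(), key=lambda kv: kv[1], reverse=True)[0][0]; head? none = Python's IndexError on an empty fm, excluded by Pre_
def pyB_winner (fm : List (String × Int)) : Option String :=
  ((PySem.List.sorted fm (fun kv => kv.2) true).head?).map Prod.fst

-- winners = [sorted(...)[0][0] for fm in maps]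
def pyB_winners (genus_map : List (String × List (String × Int))) : List (Option String) :=
  genus_map.map (fun gfm => pyB_winner gfm.2)

-- counts = {fv: 0 for fm in maps for fv in fm}
def pyB_keys (genus_map : List (String × List (String × Int))) : PySem.Dict String Int :=
  genus_map.foldl (fun d gfm => gfm.2.foldl (fun d p => d.insert p.1 0) d) PySem.Dict.empty

-- for w in winners: counts[w] += 1
def pyB_counts (genus_map : List (String × List (String × Int))) : PySem.Dict String Int :=
  (pyB_winners genus_map).foldl (fun d w =>
    match w with
    | some b => d.modify b 0 (· + 1)  -- counts[w] += 1; w is always a key of counts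
    | none => d) (pyB_keys genus_map)

def dryer_analise_alt (data : List (String × List (String × List (String × Int)))) : List (String × List (String × Int)) :=
  (data.foldl (fun ret ag => ret.insert ag.1 (pyB_counts ag.2).items)
    (PySem.Dict.empty : PySem.Dict String (List (String × Int)))).items

-- ===== PRECONDITION & SPEC =====
-- Pre_ excludes (a) association lists with duplicate keys at any dict level — the list encoding of a
-- Python dict is ambiguous there, real dicts cannot contain them — and (b) feature_maps in which no
-- language_count is ≥ 0 (including empty ones), on which A raises KeyError (current_feature stays None).
def Pre_dryer_analise (data : List (String × List (String × List (String × Int)))) : Prop :=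
  (data.map Prod.fst).Nodup ∧
  ∀ ag ∈ data, (ag.2.map Prod.fst).Nodup ∧
    ∀ gfm ∈ ag.2, (gfm.2.map Prod.fst).Nodup ∧ ∃ p ∈ gfm.2, 0 ≤ p.2
instance (data : List (String × List (String × List (String × Int)))) : Decidable (Pre_dryer_analise data) := by unfold Pre_dryer_analise; infer_instance

def pvWitness_dryer_analise : (List (String × List (String × List (String × Int)))) :=
  [("africa", [("bantu", [("svo", 3), ("sov", 1)]), ("khoisan", [("sov", 2)])]),
   ("europe", [("germanic", [("svo", 0)])])]

def Spec_dryer_analise (data : List (String × List (String × List (String × Int)))) (out : List (String × List (String × Int))) : Prop := out = dryer_analise_alt data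
instance (data : List (String × List (String × List (String × Int)))) (out : List (String × List (String × Int))) : Decidable (Spec_dryer_analise data out) := by unfold Spec_dryer_analise; infer_instance

-- ===== CLAIM (what is proved, stated in full; the proofs are below) =====
def Claim_equal_dryer_analise : Prop := ∀ (data : List (String × List (String × List (String × Int)))), Dom_dryer_analise data → Pre_dryer_analise data → Spec_dryer_analise data (dryer_analise data)

-- ===== LEMMAS AND PROOFS =====

-- proof-side per-area recursions (not used by the ports)
def pvSd1 (fm : List (String × Int)) (d : PySem.Dict String Int) : PySem.Dict String Int :=
  fm.foldl (fun d p => d.setdefault p.1 0) d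

def pvArgFrom (fm : List (String × Int)) (tc : Int × Option String) : Int × Option String :=
  fm.foldl (fun st p => if p.2 > st.1 then (p.2, some p.1) else st) tc

def pvInc (o : Option String) (d : PySem.Dict String Int) : PySem.Dict String Int :=
  match o with
  | some b => d.modify b 0 (· + 1)
  | none => d

def pvGA (fm : List (String × Int)) (d : PySem.Dict String Int) : PySem.Dict String Int :=
  match (pvArgFrom fm ((-1 : Int), none)).2 with
  | some cf => (pvSd1 fm d).modify cf 0 (· + 1)
  | none => pvSd1 fm d

def pvAreaA (gm : List (String × List (String × Int))) (d : PySem.Dict String Int) : PySem.Dict String Int :=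
  gm.foldl (fun d gfm => pvGA gfm.2 d) d

-- first-argmax from the right (keeps the leftmost maximum)
def pvFam : List (String × Int) → Option (String × Int)
  | [] => none
  | p :: rest =>
    match pvFam rest with
    | none => some p
    | some q => if p.2 < q.2 then some q else some p

theorem pvFam_eq_none {fm : List (String × Int)} (h : pvFam fm = none) : fm = [] := by
  cases fm with
  | nil => rfl
  | cons p rest =>
    simp only [pvFam] at h
    cases h2 : pvFam rest with
    | none => simp only [h2] at h; exact absurd h (by simp)
    | some q => simp only [h2] at h; split at h <;> simp at h

theorem pvFam_mem {fm : List (String × Int)} {q : String × Int} (h : pvFam fm = some q) : q ∈ fm := by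
  induction fm generalizing q with
  | nil => simp [pvFam] at h
  | cons p rest ih =>
    simp only [pvFam] at h
    cases hr : pvFam rest with
    | none => simp only [hr, Option.some.injEq] at h; subst h; exact List.mem_cons_self
    | some q' =>
      simp only [hr] at h
      by_cases hc : p.2 < q'.2
      · rw [if_pos hc] at h; simp only [Option.some.injEq] at h; subst h
        exact List.mem_cons_of_mem _ (ih hr)
      · rw [if_neg hc] at h; simp only [Option.some.injEq] at h; subst h
        exact List.mem_cons_self

theorem pvFam_isMax {fm : List (String × Int)} {q : String × Int} (h : pvFam fm = some q) :
    ∀ p ∈ fm, p.2 ≤ q.2 := by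
  induction fm generalizing q with
  | nil => simp [pvFam] at h
  | cons p rest ih =>
    simp only [pvFam] at h
    cases hr : pvFam rest with
    | none =>
      simp only [hr, Option.some.injEq] at h; subst h
      have : rest = [] := pvFam_eq_none hr
      subst this
      intro x hx; simp at hx; subst hx; exact le_refl _
    | some q' =>
      simp only [hr] at h
      by_cases hc : p.2 < q'.2
      · rw [if_pos hc] at h; simp only [Option.some.injEq] at h; subst h
        intro x hx
        rcases List.mem_cons.mp hx with rfl | h1
        · omega
        · exact ih hr x h1
      · rw [if_neg hc] at h; simp only [Option.some.injEq] at h; subst h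
        intro x hx
        rcases List.mem_cons.mp hx with rfl | h1
        · exact le_refl _
        · have := ih hr x h1; omega

theorem pvArgFrom_eq (fm : List (String × Int)) (t : Int) (c : Option String) :
    pvArgFrom fm (t, c) =
      match pvFam fm with
      | none => (t, c)
      | some q => if t < q.2 then (q.2, some q.1) else (t, c) := by
  induction fm generalizing t c with
  | nil => simp [pvArgFrom, pvFam]
  | cons p rest ih =>
    show pvArgFrom rest (if p.2 > t then (p.2, some p.1) else (t, c)) = _
    simp only [pvFam]
    by_cases hp : p.2 > t
    · rw [if_pos hp, ih]
      cases hr : pvFam rest with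
      | none => simp [if_pos hp]
      | some q =>
        by_cases hq : p.2 < q.2
        · simp [hq, if_pos (show t < q.2 by omega)]
        · simp [hq, if_pos hp]
    · rw [if_neg hp, ih]
      cases hr : pvFam rest with
      | none => simp [if_neg hp]
      | some q =>
        by_cases hq : p.2 < q.2
        · simp [hq]
        · simp only [if_neg hq]
          rw [if_neg (show ¬ t < q.2 by omega), if_neg (show ¬ t < p.2 from hp)]

-- head of the stable descending-sort accumulator: one insertBy step
theorem pvHead_insertBy (x : String × Int) (acc : List (String × Int)) :
    (PySem.List.insertBy (fun a b => decide ((fun kv : String × Int => kv.2) b < (fun kv : String × Int => kv.2) a)) x acc).head? =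
      match acc.head? with
      | none => some x
      | some m => if m.2 < x.2 then some x else some m := by
  cases acc with
  | nil => rfl
  | cons y ys =>
    show (if decide (y.2 < x.2) = true then x :: y :: ys else y :: _).head? = _
    by_cases h : y.2 < x.2 <;> simp [h]

-- head of the whole insertion fold = running first-max of the processed prefix
theorem pvFoldIns (fm : List (String × Int)) (acc : List (String × Int)) :
    (fm.foldl (fun acc x => PySem.List.insertBy (fun a b => decide ((fun kv : String × Int => kv.2) b < (fun kv : String × Int => kv.2) a)) x acc) acc).head? =
      fm.foldl (fun o x => match o with | none => some x | some m => if m.2 < x.2 then some x else some m) acc.head? := by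
  induction fm generalizing acc with
  | nil => rfl
  | cons p rest ih =>
    show (rest.foldl _ (PySem.List.insertBy _ p acc)).head? = rest.foldl _ (match acc.head? with | none => some p | some m => if m.2 < p.2 then some p else some m)
    rw [ih, pvHead_insertBy]

-- the running first-max fold computes pvFam
theorem pvMax?_from (fm : List (String × Int)) (o : Option (String × Int)) :
    fm.foldl (fun acc x => match acc with | none => some x | some m => if m.2 < x.2 then some x else some m) o =
      match pvFam fm, o with
      | none, o => o
      | some q, none => some q
      | some q, some m => if m.2 < q.2 then some q else some m := by
  induction fm generalizing o with
  | nil => cases o <;> simp [pvFam]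
  | cons p rest ih =>
    show rest.foldl _ (match o with | none => some p | some m => if m.2 < p.2 then some p else some m) = _
    cases o with
    | none =>
      rw [ih]
      simp only [pvFam]
      cases hr : pvFam rest with
      | none => rfl
      | some q => by_cases hq : p.2 < q.2 <;> simp [hq]
    | some m =>
      show rest.foldl _ (if m.2 < p.2 then some p else some m) = _
      by_cases hm : m.2 < p.2
      · rw [if_pos hm, ih]
        simp only [pvFam]
        cases hr : pvFam rest with
        | none => simp [hm]
        | some q =>
          by_cases hq : p.2 < q.2
          · simp [hq, show m.2 < q.2 by omega]
          · simp [hq, hm]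
      · rw [if_neg hm, ih]
        simp only [pvFam]
        cases hr : pvFam rest with
        | none => simp [hm]
        | some q =>
          by_cases hq : p.2 < q.2
          · simp [hq]
          · simp [hq, hm, show ¬ m.2 < q.2 by omega]

-- head of the stable descending sort = the first maximum
theorem pvWinner_eq (fm : List (String × Int)) :
    pyB_winner fm = (pvFam fm).map Prod.fst := by
  rw [pyB_winner, PySem.List.sorted_rev_eq_foldl_insertBy, pvFoldIns]
  show (fm.foldl (fun o x => match o with | none => some x | some m => if m.2 < x.2 then some x else some m) none).map Prod.fst = _
  rw [pvMax?_from fm none]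
  cases pvFam fm <;> rfl

theorem pvWinner' {fm : List (String × Int)} (h : ∃ p ∈ fm, 0 ≤ p.2) :
    ∃ q, pvFam fm = some q ∧ q ∈ fm ∧ 0 ≤ q.2 ∧
      (pvArgFrom fm ((-1 : Int), none)).2 = some q.1 := by
  obtain ⟨p, hp, hp0⟩ := h
  cases hf : pvFam fm with
  | none => rw [pvFam_eq_none hf] at hp; simp at hp
  | some q =>
    refine ⟨q, rfl, pvFam_mem hf, le_trans hp0 (pvFam_isMax hf p hp), ?_⟩
    rw [pvArgFrom_eq]
    simp only [hf]
    rw [if_pos (show (-1 : Int) < q.2 by have := pvFam_isMax hf p hp; omega)]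

-- small dict facts at the items level
theorem pvGet?_append_left {ν : Type} (l1 l2 : List (String × ν)) (k : String)
    (h : (PySem.Dict.mk l1).contains k = true) :
    (PySem.Dict.mk (l1 ++ l2) : PySem.Dict String ν).get? k = (PySem.Dict.mk l1).get? k := by
  simp only [PySem.Dict.get?, List.find?_append]
  cases hf : l1.find? (fun p => p.1 == k) with
  | none =>
    rw [List.find?_eq_none] at hf
    simp only [PySem.Dict.contains_mk, List.any_eq_true] at h
    obtain ⟨p, hp, hpk⟩ := h
    exact absurd hpk (hf p hp)
  | some p => rfl

theorem pvModify_items (d : PySem.Dict String Int) (k : String) (f : Int → Int)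
    (hk : d.contains k = true) :
    (d.modify k 0 f).items = d.items.map (fun p => if p.1 == k then (k, f (d.getD k 0)) else p) := by
  simp [PySem.Dict.modify, PySem.Dict.insert, hk]

-- setdefault commutes with an increment at a key that is already present
theorem pvSd_mod_comm (d : PySem.Dict String Int) (k k' : String)
    (hk : d.contains k = true) :
    (d.modify k 0 (· + 1)).setdefault k' 0 = (d.setdefault k' 0).modify k 0 (· + 1) := by
  cases h' : d.contains k' with
  | true =>
    rw [PySem.Dict.setdefault_of_contains _ _ h',
        PySem.Dict.setdefault_of_contains _ _ (by rw [PySem.Dict.contains_modify]; simp [h'])]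
  | false =>
    have hne : (k' == k) = false := by
      rcases instDecidableEqString k' k with hne2 | hne2
      · exact beq_eq_false_iff_ne.mpr hne2
      · subst hne2; rw [hk] at h'; cases h'
    have h'2 : (d.modify k 0 (· + 1)).contains k' = false := by
      rw [PySem.Dict.contains_modify]; simp [h', hne]
    rw [PySem.Dict.setdefault_of_not_contains _ _ h'2,
        PySem.Dict.setdefault_of_not_contains _ _ h']
    -- both sides: insert k' at the back commutes with the in-place bump at k
    have hins : d.insert k' 0 = PySem.Dict.mk (d.items ++ [(k', 0)]) := by
      rw [PySem.Dict.insert]; simp [h']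
    have hka : (PySem.Dict.mk (d.items ++ [(k', 0)]) : PySem.Dict String Int).contains k = true := by
      rw [PySem.Dict.contains_mk, List.any_append]
      rw [PySem.Dict.contains] at hk
      simp [hk]
    have hgd : (PySem.Dict.mk (d.items ++ [(k', 0)]) : PySem.Dict String Int).getD k 0 = d.getD k 0 := by
      unfold PySem.Dict.getD
      rw [pvGet?_append_left _ _ _ hk]
    apply PySem.Dict.ext
    rw [hins, pvModify_items _ _ _ hka, hgd]
    rw [show ((d.modify k 0 (· + 1)).insert k' 0).items = (d.modify k 0 (· + 1)).items ++ [(k', 0)] from by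
      rw [PySem.Dict.insert]; simp [h'2]]
    rw [pvModify_items _ _ _ hk]
    rw [List.map_append]
    congr 1
    have hne' : k' ≠ k := by simpa using hne
    simp [hne']

theorem pvContains_sd1 (fm : List (String × Int)) (d : PySem.Dict String Int) (k : String)
    (hk : d.contains k = true) : (pvSd1 fm d).contains k = true := by
  induction fm generalizing d with
  | nil => exact hk
  | cons p rest ih =>
    show (pvSd1 rest (d.setdefault p.1 0)).contains k = true
    exact ih _ (by rw [PySem.Dict.contains_setdefault]; simp [hk])

theorem pvContains_sd1_mem (fm : List (String × Int)) (d : PySem.Dict String Int)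
    {p : String × Int} (hp : p ∈ fm) : (pvSd1 fm d).contains p.1 = true := by
  induction fm generalizing d with
  | nil => simp at hp
  | cons q rest ih =>
    show (pvSd1 rest (d.setdefault q.1 0)).contains p.1 = true
    rcases List.mem_cons.mp hp with rfl | h1
    · exact pvContains_sd1 _ _ _ (by rw [PySem.Dict.contains_setdefault]; simp)
    · exact ih _ h1

theorem pvSd1_mod_comm (fm : List (String × Int)) (d : PySem.Dict String Int) (k : String)
    (hk : d.contains k = true) :
    pvSd1 fm (d.modify k 0 (· + 1)) = (pvSd1 fm d).modify k 0 (· + 1) := by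
  induction fm generalizing d with
  | nil => rfl
  | cons p rest ih =>
    show pvSd1 rest ((d.modify k 0 (· + 1)).setdefault p.1 0) = _
    rw [pvSd_mod_comm _ _ _ hk]
    exact ih _ (by rw [PySem.Dict.contains_setdefault]; simp [hk])

theorem pvSdFold_inc_comm (gms : List (String × List (String × Int)))
    (d : PySem.Dict String Int) (k : String) (hk : d.contains k = true) :
    gms.foldl (fun d gfm => pvSd1 gfm.2 d) (d.modify k 0 (· + 1)) =
      (gms.foldl (fun d gfm => pvSd1 gfm.2 d) d).modify k 0 (· + 1) := by
  induction gms generalizing d with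
  | nil => rfl
  | cons g rest ih =>
    show rest.foldl _ (pvSd1 g.2 (d.modify k 0 (· + 1))) = _
    rw [pvSd1_mod_comm _ _ _ hk]
    exact ih _ (pvContains_sd1 _ _ _ hk)

-- the phase exchange: A's interleaved loop = setdefault phase, then winner-increment phase
theorem pvPhase (gm : List (String × List (String × Int))) (d : PySem.Dict String Int)
    (h : ∀ gfm ∈ gm, ∃ p ∈ gfm.2, 0 ≤ p.2) :
    pvAreaA gm d =
      gm.foldl (fun d gfm => pvInc ((pvFam gfm.2).map Prod.fst) d)
        (gm.foldl (fun d gfm => pvSd1 gfm.2 d) d) := by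
  induction gm generalizing d with
  | nil => rfl
  | cons g rest ih =>
    obtain ⟨q, hf, hqm, hq0, hArg⟩ := pvWinner' (h g List.mem_cons_self)
    have hGA : pvGA g.2 d = ((pvSd1 g.2 d).modify q.1 0 (· + 1)) := by
      rw [pvGA, hArg]
    show pvAreaA rest (pvGA g.2 d) =
      rest.foldl _ (pvInc ((pvFam g.2).map Prod.fst) (rest.foldl _ (pvSd1 g.2 d)))
    rw [hf]
    show pvAreaA rest (pvGA g.2 d) =
      rest.foldl _ ((rest.foldl (fun d gfm => pvSd1 gfm.2 d) (pvSd1 g.2 d)).modify q.1 0 (· + 1))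
    rw [← pvSdFold_inc_comm _ _ _ (pvContains_sd1_mem _ _ hqm), ← hGA]
    exact ih _ (fun gfm hg => h gfm (List.mem_cons_of_mem _ hg))

-- insert-0 equals setdefault-0 on an all-zero dict
theorem pvInsert0 (d : PySem.Dict String Int) (k : String)
    (h : ∀ p ∈ d.items, p.2 = 0) :
    d.insert k 0 = d.setdefault k 0 ∧ ∀ p ∈ (d.setdefault k 0).items, p.2 = 0 := by
  cases hc : d.contains k with
  | false =>
    rw [PySem.Dict.setdefault_of_not_contains _ _ hc]
    refine ⟨rfl, ?_⟩
    rw [PySem.Dict.insert]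
    simp only [hc]
    intro p hp
    rcases List.mem_append.mp hp with h1 | h1
    · exact h p h1
    · simp at h1; simp [h1]
  | true =>
    rw [PySem.Dict.setdefault_of_contains _ _ hc]
    constructor
    · apply PySem.Dict.ext
      rw [PySem.Dict.insert]
      simp only [hc, if_pos]
      show List.map _ d.items = d.items
      rw [show d.items = d.items.map id from (List.map_id _).symm]
      rw [List.map_map]
      apply List.map_congr_left
      intro p hp
      simp only [Function.comp, id]
      by_cases hpk : (p.1 == k) = true
      · rw [if_pos hpk]
        have : p.1 = k := by simpa using hpk
        have : p = (k, 0) := by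
          cases p with
          | mk a b => simp at this ⊢; exact ⟨this, h _ hp⟩
        rw [this]
      · rw [if_neg hpk]
    · exact h

theorem pvIns0 (fm : List (String × Int)) (d : PySem.Dict String Int)
    (h : ∀ p ∈ d.items, p.2 = 0) :
    fm.foldl (fun d p => d.insert p.1 0) d = pvSd1 fm d ∧
      ∀ p ∈ (pvSd1 fm d).items, p.2 = 0 := by
  induction fm generalizing d with
  | nil => exact ⟨rfl, h⟩
  | cons p rest ih =>
    obtain ⟨h1, h2⟩ := pvInsert0 d p.1 h
    show rest.foldl _ (d.insert p.1 0) = pvSd1 rest (d.setdefault p.1 0) ∧ _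
    rw [h1]
    exact ih _ h2

theorem pvKeysAux (gm : List (String × List (String × Int))) (d : PySem.Dict String Int)
    (h : ∀ p ∈ d.items, p.2 = 0) :
    gm.foldl (fun d gfm => gfm.2.foldl (fun d p => d.insert p.1 0) d) d =
      gm.foldl (fun d gfm => pvSd1 gfm.2 d) d ∧
      ∀ p ∈ (gm.foldl (fun d gfm => pvSd1 gfm.2 d) d).items, p.2 = 0 := by
  induction gm generalizing d with
  | nil => exact ⟨rfl, h⟩
  | cons g rest ih =>
    obtain ⟨h1, h2⟩ := pvIns0 g.2 d h
    show rest.foldl _ (g.2.foldl (fun d p => d.insert p.1 0) d) = rest.foldl _ (pvSd1 g.2 d) ∧ _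
    rw [h1]
    exact ih _ h2

theorem pvKeys_eq (gm : List (String × List (String × Int))) :
    pyB_keys gm = gm.foldl (fun d gfm => pvSd1 gfm.2 d) PySem.Dict.empty :=
  (pvKeysAux gm PySem.Dict.empty (by intro p hp; simp [PySem.Dict.empty] at hp)).1

-- per-area equality
theorem pvArea_eq (gm : List (String × List (String × Int)))
    (h : ∀ gfm ∈ gm, ∃ p ∈ gfm.2, 0 ≤ p.2) :
    pvAreaA gm PySem.Dict.empty = pyB_counts gm := by
  rw [pyB_counts, pvKeys_eq, pyB_winners, List.foldl_map]
  have hfun : (fun (d : PySem.Dict String Int) (gfm : String × List (String × Int)) =>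
      (fun d w => match w with | some b => PySem.Dict.modify d b 0 (· + 1) | none => d) d (pyB_winner gfm.2)) =
      (fun d gfm => pvInc ((pvFam gfm.2).map Prod.fst) d) := by
    funext d gfm
    rw [pvWinner_eq]
    cases (pvFam gfm.2).map Prod.fst <;> rfl
  rw [hfun]
  exact pvPhase gm PySem.Dict.empty h

-- locality of A's mutations: everything targets the last entry (area, ·)
theorem pvModify_app {ν : Type} (l : List (String × ν)) (a : String) (d : ν) (dflt : ν) (f : ν → ν)
    (hl : ∀ p ∈ l, (p.1 == a) = false) :
    (PySem.Dict.mk (l ++ [(a, d)])).modify a dflt f = PySem.Dict.mk (l ++ [(a, f d)]) := by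
  have hc : (PySem.Dict.mk (l ++ [(a, d)]) : PySem.Dict String ν).contains a = true := by
    rw [PySem.Dict.contains_mk, List.any_append]; simp
  have hg : (PySem.Dict.mk (l ++ [(a, d)]) : PySem.Dict String ν).getD a dflt = d := by
    unfold PySem.Dict.getD PySem.Dict.get?
    rw [List.find?_append, show l.find? (fun p => p.1 == a) = none from
      List.find?_eq_none.mpr (fun p hp => by simp [hl p hp])]
    simp
  rw [PySem.Dict.modify, hg, PySem.Dict.insert]
  simp only [hc, if_pos]
  apply PySem.Dict.ext
  show List.map _ (l ++ [(a, d)]) = _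
  rw [List.map_append]
  congr 1
  · conv_rhs => rw [← List.map_id l]
    apply List.map_congr_left
    intro p hp
    rw [if_neg (by simp [hl p hp])]
    rfl
  · simp

theorem pvFeatureLoop_local (fm : List (String × Int)) (l : List (String × PySem.Dict String Int))
    (a : String) (d : PySem.Dict String Int) (tc : Int × Option String)
    (hl : ∀ p ∈ l, (p.1 == a) = false) :
    pyA_featureLoop a fm (PySem.Dict.mk (l ++ [(a, d)]), tc) =
      (PySem.Dict.mk (l ++ [(a, pvSd1 fm d)]), pvArgFrom fm tc) := by
  induction fm generalizing d tc with
  | nil => rfl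
  | cons p rest ih =>
    show pyA_featureLoop a rest
        ((PySem.Dict.mk (l ++ [(a, d)])).modify a PySem.Dict.empty (fun dd => dd.setdefault p.1 0),
         if p.2 > tc.1 then (p.2, some p.1) else tc) = _
    rw [pvModify_app _ _ _ _ _ hl, ih]
    rfl

theorem pvGenusLoop_local (gm : List (String × List (String × Int)))
    (l : List (String × PySem.Dict String Int)) (a : String) (d : PySem.Dict String Int)
    (hl : ∀ p ∈ l, (p.1 == a) = false) :
    pyA_genusLoop a gm (PySem.Dict.mk (l ++ [(a, d)])) =
      PySem.Dict.mk (l ++ [(a, pvAreaA gm d)]) := by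
  induction gm generalizing d with
  | nil => rfl
  | cons g rest ih =>
    show pyA_genusLoop a rest
      (match (pyA_featureLoop a g.2 (PySem.Dict.mk (l ++ [(a, d)]), ((-1 : Int), none))).2.2 with
       | some cf => (pyA_featureLoop a g.2 (PySem.Dict.mk (l ++ [(a, d)]), ((-1 : Int), none))).1.modify
            a PySem.Dict.empty (fun dd => dd.modify cf 0 (· + 1))
       | none => (pyA_featureLoop a g.2 (PySem.Dict.mk (l ++ [(a, d)]), ((-1 : Int), none))).1) = _
    rw [pvFeatureLoop_local _ _ _ _ _ hl]
    show pyA_genusLoop a rest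
      (match (pvArgFrom g.2 ((-1 : Int), none)).2 with
       | some cf => (PySem.Dict.mk (l ++ [(a, pvSd1 g.2 d)])).modify a PySem.Dict.empty
            (fun dd => dd.modify cf 0 (· + 1))
       | none => PySem.Dict.mk (l ++ [(a, pvSd1 g.2 d)])) = _
    have hA : pvAreaA (g :: rest) d = pvAreaA rest (pvGA g.2 d) := rfl
    rw [hA]
    cases hw : (pvArgFrom g.2 ((-1 : Int), none)).2 with
    | none =>
      show pyA_genusLoop a rest (PySem.Dict.mk (l ++ [(a, pvSd1 g.2 d)])) = _
      rw [show pvGA g.2 d = pvSd1 g.2 d by rw [pvGA, hw]]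
      exact ih _
    | some cf =>
      show pyA_genusLoop a rest
        ((PySem.Dict.mk (l ++ [(a, pvSd1 g.2 d)])).modify a PySem.Dict.empty
          (fun dd => dd.modify cf 0 (· + 1))) = _
      rw [pvModify_app _ _ _ _ _ hl]
      rw [show (pvSd1 g.2 d).modify cf 0 (· + 1) = pvGA g.2 d by rw [pvGA, hw]]
      exact ih _

theorem pvOuterA (data : List (String × List (String × List (String × Int))))
    (l : List (String × PySem.Dict String Int))
    (hnd : (data.map Prod.fst).Nodup)
    (hl : ∀ a ∈ data.map Prod.fst, ∀ p ∈ l, (p.1 == a) = false) :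
    data.foldl (fun ret ag => pyA_genusLoop ag.1 ag.2 (ret.setdefault ag.1 PySem.Dict.empty))
        (PySem.Dict.mk l) =
      PySem.Dict.mk (l ++ data.map (fun ag => (ag.1, pvAreaA ag.2 PySem.Dict.empty))) := by
  induction data generalizing l with
  | nil => simp
  | cons ag rest ih =>
    have hl1 : ∀ p ∈ l, (p.1 == ag.1) = false :=
      hl ag.1 (by simp)
    have hc : (PySem.Dict.mk l : PySem.Dict String (PySem.Dict String Int)).contains ag.1 = false := by
      rw [PySem.Dict.contains_mk]
      simp only [List.any_eq_false]
      intro p hp; simp [hl1 p hp]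
    show rest.foldl _ (pyA_genusLoop ag.1 ag.2 ((PySem.Dict.mk l).setdefault ag.1 PySem.Dict.empty)) = _
    rw [PySem.Dict.setdefault_of_not_contains _ _ hc, PySem.Dict.insert]
    simp only [hc, Bool.false_eq_true, if_false]
    rw [pvGenusLoop_local _ _ _ _ hl1]
    rw [ih (l ++ [(ag.1, pvAreaA ag.2 PySem.Dict.empty)])
      (by simpa using hnd.of_cons)
      (by
        intro a ha p hp
        rcases List.mem_append.mp hp with h1 | h1
        · exact hl a (List.mem_cons_of_mem _ ha) p h1
        · simp only [List.mem_singleton] at h1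
          subst h1
          have : ag.1 ≠ a := by
            intro hcontra
            rw [List.map_cons, List.nodup_cons] at hnd
            exact hnd.1 (hcontra ▸ ha)
          simpa using this)]
    simp

theorem pvOuterB (data : List (String × List (String × List (String × Int))))
    (l : List (String × List (String × Int)))
    (hnd : (data.map Prod.fst).Nodup)
    (hl : ∀ a ∈ data.map Prod.fst, ∀ p ∈ l, (p.1 == a) = false) :
    data.foldl (fun ret ag => ret.insert ag.1 (pyB_counts ag.2).items) (PySem.Dict.mk l) =
      PySem.Dict.mk (l ++ data.map (fun ag => (ag.1, (pyB_counts ag.2).items))) := by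
  induction data generalizing l with
  | nil => simp
  | cons ag rest ih =>
    have hl1 : ∀ p ∈ l, (p.1 == ag.1) = false := hl ag.1 (by simp)
    have hc : (PySem.Dict.mk l : PySem.Dict String (List (String × Int))).contains ag.1 = false := by
      rw [PySem.Dict.contains_mk]
      simp only [List.any_eq_false]
      intro p hp; simp [hl1 p hp]
    show rest.foldl _ ((PySem.Dict.mk l).insert ag.1 (pyB_counts ag.2).items) = _
    rw [PySem.Dict.insert]
    simp only [hc, Bool.false_eq_true, if_false]
    rw [ih (l ++ [(ag.1, (pyB_counts ag.2).items)])
      (by simpa using hnd.of_cons)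
      (by
        intro a ha p hp
        rcases List.mem_append.mp hp with h1 | h1
        · exact hl a (List.mem_cons_of_mem _ ha) p h1
        · simp only [List.mem_singleton] at h1
          subst h1
          have : ag.1 ≠ a := by
            intro hcontra
            rw [List.map_cons, List.nodup_cons] at hnd
            exact hnd.1 (hcontra ▸ ha)
          simpa using this)]
    simp

-- ===== VERDICT (by name: the statement is the Claim_ definition above) =====
theorem dryer_analise_spec : Claim_equal_dryer_analise := by
  intro data _ hpre
  unfold Spec_dryer_analise dryer_analise dryer_analise_alt
  rw [show (PySem.Dict.empty : PySem.Dict String (PySem.Dict String Int)) = PySem.Dict.mk [] from rfl,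
      show (PySem.Dict.empty : PySem.Dict String (List (String × Int))) = PySem.Dict.mk [] from rfl]
  rw [pvOuterA data [] hpre.1 (by intro a _ p hp; simp at hp),
      pvOuterB data [] hpre.1 (by intro a _ p hp; simp at hp)]
  show (data.map (fun ag => (ag.1, pvAreaA ag.2 PySem.Dict.empty))).map (fun p => (p.1, p.2.items)) =
    data.map (fun ag => (ag.1, (pyB_counts ag.2).items))
  rw [List.map_map]
  apply List.map_congr_left
  intro ag hag
  simp only [Function.comp]
  rw [pvArea_eq ag.2 (fun gfm hg => ((hpre.2 ag hag).2 gfm hg).2)]
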